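-- pv_equiv track=rewrite | github.com/MassimoNodin/spell-and-assign | spell_and_assign.py | clean_and_split
-- ===== SOURCE A (Python) =====
-- def clean_and_split(line):
--     """
--     Function Description: Cleans and splits a line into words
--
--     Approach Description: This method cleans and splits a line into words by iterating over each character in the line. The method ignores non-alphanumeric characters and appends alphanumeric characters to a word. The method then appends the word to a list of words.
--
--     Input:
--         line: a string representing the line to be cleaned and split into words
--
--     Output:
--         words: a list of strings representing the words in the line
--
--     Time Complexity: O(W) where W is the number of characters in the input line
--
--     Time Complexity Analysis: O(W), where W is the number of characters in the input line
--         The for loop iterates over each character in the input line leading to O(W) time complexity.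
--         The append method called in the for loop has a constant time complexity of O(1) leading to O(W*1), O(W) time complexity.
--
--         The big Θ notation is the same as the big O notation as the time complexity is the same in the best and worst case scenarios
--
--     Space Complexity: O(W)
--
--     Space Complexity Analysis:
--         The space for the word list is proportional to the number of characters in the input line leading to O(W) space complexity.
--
--         The big Θ notation is the same as the big O notation as the time complexity is the same in the best and worst case scenarios
--
--     Auxiliary Space Complexity: O(1)
--
--     Auxiliary Space Complexity Analysis:
--         The auxiliary space complexity is equal to space complexity - input size, therefore the auxiliary space complexity is O(W) - O(W) = O(1).
--
--         The big Θ notation is the same as the big O notation as the time complexity is the same in the best and worst case scenarios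
--     """
--     # Initialise the word list and a string to concatenate characters to form a word
--     word = ""
--     words = []
--     for char in line:
--         # Ignore non-alphanumeric characters
--         if char.isalnum():
--             word += char
--         # If it is the end of a word, append the word to the list of words
--         else:
--             if word:
--                 words.append(word)
--                 word = ""
--     # If there is a word at the end of the line, append the word to the list of words
--     if word:
--         words.append(word)
--     return words
-- ===== SOURCE B (Python) =====
-- def clean_and_split(line):
--     # Span scan: find each maximal alphanumeric run with two indices and
--     # slice it out, instead of A's per-character buffer-and-flush state machine.
--     words = []
--     n = len(line)
--     i = 0
--     while i < n:
--         if line[i].isalnum():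
--             j = i
--             while j < n and line[j].isalnum():
--                 j += 1
--             words.append(line[i:j])
--             i = j
--         else:
--             i += 1
--     return words
-- ===== Notes on version B (the rewrite author's own statement) =====
-- stated objective: alternative
-- what changed: Replaced A's character-at-a-time buffer-and-flush state machine with a two-pointer span scan that locates each maximal alphanumeric run and slices it out in one step, eliminating the mutable word buffer and the flush-on-boundary logic.
import Mathlib
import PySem

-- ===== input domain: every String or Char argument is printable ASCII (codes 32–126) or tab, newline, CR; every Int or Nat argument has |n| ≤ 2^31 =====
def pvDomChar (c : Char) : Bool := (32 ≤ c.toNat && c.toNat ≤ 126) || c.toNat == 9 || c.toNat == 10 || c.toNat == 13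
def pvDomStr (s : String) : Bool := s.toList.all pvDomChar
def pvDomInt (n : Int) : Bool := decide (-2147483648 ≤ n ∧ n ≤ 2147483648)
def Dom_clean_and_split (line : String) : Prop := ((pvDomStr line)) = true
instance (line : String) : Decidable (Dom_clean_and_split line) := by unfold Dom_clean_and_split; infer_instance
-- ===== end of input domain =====

-- B replaces A's buffer-and-flush state machine with a two-pointer span scan over
-- maximal alphanumeric runs (objective: alternative, same O(n) cost).

-- ===== PORT A =====
-- A's loop state: the current word buffer (as List Char) and the words collected so far.
def pvFoldA : List Char → List Char → List String → List String
  | [], word, words => if word ≠ [] then words ++ [String.ofList word] else words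
  | c :: cs, word, words =>
      if PySem.Chars.isalnum c then pvFoldA cs (word ++ [c]) words
      else if word ≠ [] then pvFoldA cs [] (words ++ [String.ofList word])
      else pvFoldA cs [] words

def clean_and_split (line : String) : List String :=
  pvFoldA line.toList [] []

-- ===== PORT B =====
-- Source B's outer while loop: skip a non-alnum char, or slice out the maximal alnum run
-- (the inner 'while j < n and line[j].isalnum()' = takeWhile/dropWhile on the rest).
def pvSpanB : List Char → List String
  | [] => []
  | c :: cs =>
      if PySem.Chars.isalnum c then
        String.ofList ((c :: cs).takeWhile PySem.Chars.isalnum)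
          :: pvSpanB ((c :: cs).dropWhile PySem.Chars.isalnum)
      else pvSpanB cs
  termination_by l => l.length
  decreasing_by
    · simp only [List.dropWhile_cons, *, if_pos]
      simpa using Nat.lt_succ_of_le (List.length_dropWhile_le _ _)
    · simp

def clean_and_split_alt (line : String) : List String :=
  pvSpanB line.toList

-- ===== PRECONDITION & SPEC =====
def Spec_clean_and_split (line : String) (out : List String) : Prop := out = clean_and_split_alt line
instance (line : String) (out : List String) : Decidable (Spec_clean_and_split line out) := by unfold Spec_clean_and_split; infer_instance

-- ===== CLAIM (what is proved, stated in full; the proofs are below) =====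
def Claim_equal_clean_and_split : Prop := ∀ (line : String), Dom_clean_and_split line → Spec_clean_and_split line (clean_and_split line)

-- ===== LEMMAS AND PROOFS =====

theorem pvSpanB_nil : pvSpanB [] = [] := by rw [pvSpanB]

theorem pvSpanB_cons (c : Char) (cs : List Char) :
    pvSpanB (c :: cs) =
      if PySem.Chars.isalnum c then
        String.ofList ((c :: cs).takeWhile PySem.Chars.isalnum)
          :: pvSpanB ((c :: cs).dropWhile PySem.Chars.isalnum)
      else pvSpanB cs := by rw [pvSpanB]

-- A's accumulator distributes: words already collected are a prefix of the result.
theorem pvFoldA_acc (l : List Char) : ∀ (w : List Char) (ws : List String),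
    pvFoldA l w ws = ws ++ pvFoldA l w [] := by
  induction l with
  | nil =>
      intro w ws
      by_cases hw : w = [] <;> simp [pvFoldA, hw]
  | cons c cs ih =>
      intro w ws
      by_cases hc : PySem.Chars.isalnum c
      · simp only [pvFoldA, hc, if_pos]
        exact ih _ _
      · by_cases hw : w = []
        · simp only [pvFoldA, hc, hw, Bool.false_eq_true, if_neg, ne_eq, not_true_eq_false,
            ite_self, ite_false]
          exact ih _ _
        · have h : ∀ ws' : List String,
              pvFoldA (c :: cs) w ws' = pvFoldA cs [] (ws' ++ [String.ofList w]) := by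
            intro ws'; simp [pvFoldA, hc, hw]
          rw [h ws, h []]
          simp only [List.nil_append]
          rw [ih [] (ws ++ [String.ofList w]), ih [] [String.ofList w]]
          simp

-- Main invariant: with buffer w, A finishes the current run (w ++ takeWhile) and then
-- behaves like B on the rest; with empty buffer A equals B.
theorem pvFoldA_eq_span (l : List Char) :
    pvFoldA l [] [] = pvSpanB l ∧
    ∀ (w : List Char), w ≠ [] →
      pvFoldA l w [] =
        String.ofList (w ++ l.takeWhile PySem.Chars.isalnum)
          :: pvSpanB (l.dropWhile PySem.Chars.isalnum) := by
  induction l with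
  | nil =>
      refine ⟨by simp [pvFoldA, pvSpanB_nil], ?_⟩
      intro w hw
      simp [pvFoldA, pvSpanB_nil, hw]
  | cons c cs ih =>
      by_cases hc : PySem.Chars.isalnum c
      · constructor
        · have h1 := ih.2 [c] (by simp)
          simp only [pvFoldA, hc, if_pos, List.nil_append]
          rw [h1, pvSpanB_cons, if_pos hc]
          simp [hc]
        · intro w hw
          have h1 := ih.2 (w ++ [c]) (by simp)
          simp only [pvFoldA, hc, if_pos]
          rw [h1]
          simp [hc]
      · constructor
        · simp only [pvFoldA, hc, Bool.false_eq_true, if_neg, ne_eq, not_true_eq_false,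
            ite_self, ite_false]
          rw [ih.1, pvSpanB_cons, if_neg hc]
        · intro w hw
          have h : pvFoldA (c :: cs) w [] = pvFoldA cs [] [String.ofList w] := by
            simp [pvFoldA, hc, hw]
          rw [h, pvFoldA_acc, ih.1]
          simp [pvSpanB_cons, hc]

-- ===== VERDICT (by name: the statement is the Claim_ definition above) =====
theorem clean_and_split_spec : Claim_equal_clean_and_split := by
  intro line _
  unfold Spec_clean_and_split clean_and_split clean_and_split_alt
  exact (pvFoldA_eq_span line.toList).1
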